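-- pv_equiv track=rewrite | github.com/Selinayujia/Web-Mining-and-Recommender-Systems | hw3/homework3.py | recommendationWThreshold
-- ===== SOURCE A (Python) =====
-- def recommendationWThreshold(totalRead, mostPopular, t):
--     recommendation = set()
--     count = 0
--     for ic, i in mostPopular:
--         count += ic
--         recommendation.add(i)
--         if count > int(totalRead*(t/100)): break
--     return recommendation
-- ===== SOURCE B (Python) =====
-- def recommendationWThreshold(totalRead, mostPopular, t):
--     threshold = int(totalRead * (t / 100))
--     prefix = []
--     s = 0
--     for ic, _ in mostPopular:
--         s += ic
--         prefix.append(s)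
--     cut = next((idx + 1 for idx, c in enumerate(prefix) if c > threshold),
--                len(prefix))
--     return {i for _, i in mostPopular[:cut]}
-- ===== Notes on version B (the rewrite author's own statement) =====
-- stated objective: alternative
-- what changed: B splits A's single stateful break-loop into two phases: it computes the threshold once and a prefix-sum table of the counts, derives the cutoff index from that table, and builds the result set from a slice, instead of interleaving counting, set insertion and the break test per element.
import Mathlib
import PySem

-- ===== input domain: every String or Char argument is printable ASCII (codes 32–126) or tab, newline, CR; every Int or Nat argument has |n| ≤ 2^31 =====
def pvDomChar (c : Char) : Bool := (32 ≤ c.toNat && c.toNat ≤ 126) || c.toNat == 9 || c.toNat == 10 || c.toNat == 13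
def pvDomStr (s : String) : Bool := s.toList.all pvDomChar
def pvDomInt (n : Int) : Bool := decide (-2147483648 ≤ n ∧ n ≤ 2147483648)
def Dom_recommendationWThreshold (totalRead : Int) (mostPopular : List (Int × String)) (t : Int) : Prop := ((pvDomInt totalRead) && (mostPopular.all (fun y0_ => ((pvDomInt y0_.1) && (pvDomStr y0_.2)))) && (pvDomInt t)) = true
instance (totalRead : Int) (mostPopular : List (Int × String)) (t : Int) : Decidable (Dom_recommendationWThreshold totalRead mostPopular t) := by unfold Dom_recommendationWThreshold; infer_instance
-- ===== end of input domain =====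

-- B replaces A's single stateful break-loop (running count + set insertion + threshold test
-- per element) by two phases: a prefix-sum table with an index search for the cutoff, then a
-- slice turned into a set; objective: alternative decomposition (same O(n) cost).
-- The Python float expression int(totalRead*(t/100)) is modelled EXACTLY by pvFloatThresh below
-- (IEEE-754 double rounding of t/100 and of the product, round-half-to-even, then truncation);
-- it is a shared primitive of both ports, like a PySem builtin.

-- round-half-to-even of N / q (N q : Nat, q > 0)
def pvRndDiv (N q : Nat) : Nat :=
  let Q := N / q
  let R := N % q
  if 2*R > q ∨ (2*R = q ∧ Q % 2 = 1) then Q + 1 else Q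

-- exact value of Python's  int(totalRead * (t / 100))  for |totalRead|,|t| ≤ 2^31:
-- t/100 is rounded to the nearest double (53-bit significand, ties to even), the product with
-- totalRead (itself exact as a double) is rounded the same way, then truncated toward zero.
def pvFloatThresh (totalRead t : Int) : Int :=
  if totalRead = 0 ∨ t = 0 then 0
  else
    let sgn : Int := if (0 < totalRead ∧ 0 < t) ∨ (totalRead < 0 ∧ t < 0) then 1 else -1
    let T := totalRead.natAbs
    let U := t.natAbs
    let N := U * 2^120
    let s := (N / 100).size - 53            -- Nat.size n = Python n.bit_length()
    let m := pvRndDiv N (100 * 2^s)         -- double(t/100) = m * 2^(s-120)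
    let P := T * m
    let two := if 53 < P.size then (pvRndDiv P (2^(P.size - 53)), P.size - 53) else (P, 0)
    let P' := two.1
    let s2 := two.2
    let mag : Nat := if 120 ≤ s2 + s then P' * 2^(s2 + s - 120) else P' / 2^(120 - (s2 + s))
    sgn * (mag : Int)

-- ===== PORT A =====
-- the for-loop of A: state = (recommendation set, count); A re-evaluates the threshold
-- expression every iteration, so the port calls pvFloatThresh inside the loop body.
def recWT_goA (totalRead t : Int) (recSet : PySem.Set String) (count : Int) :
    List (Int × String) → List String
  | [] => recSet
  | (ic, i) :: rest =>
    let count' := count + ic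
    let recSet' := PySem.Set.add recSet i
    if count' > pvFloatThresh totalRead t then recSet'
    else recWT_goA totalRead t recSet' count' rest

def recommendationWThreshold (totalRead : Int) (mostPopular : List (Int × String)) (t : Int) : List String :=
  recWT_goA totalRead t PySem.Set.empty 0 mostPopular

-- ===== PORT B =====
-- prefix-sum table of the counts (Source B's first loop)
def recWT_prefix (s : Int) : List (Int × String) → List Int
  | [] => []
  | (ic, _) :: rest => (s + ic) :: recWT_prefix (s + ic) rest

-- next((idx+1 for idx, c in enumerate(prefix) if c > threshold), len(prefix))
def recWT_find (th : Int) (idx : Nat) : List Int → Option Nat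
  | [] => none
  | c :: rest => if c > th then some (idx + 1) else recWT_find th (idx + 1) rest

def recommendationWThreshold_alt (totalRead : Int) (mostPopular : List (Int × String)) (t : Int) : List String :=
  let threshold := pvFloatThresh totalRead t
  let pref := recWT_prefix 0 mostPopular
  let cut := (recWT_find threshold 0 pref).getD pref.length
  -- mostPopular[:cut] with 0 ≤ cut is List.take; {i for _, i in …} is Set.ofList of the snds
  PySem.Set.ofList ((mostPopular.take cut).map Prod.snd)

-- ===== PRECONDITION & SPEC =====
def Spec_recommendationWThreshold (totalRead : Int) (mostPopular : List (Int × String)) (t : Int) (out : List String) : Prop := out = recommendationWThreshold_alt totalRead mostPopular t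
instance (totalRead : Int) (mostPopular : List (Int × String)) (t : Int) (out : List String) : Decidable (Spec_recommendationWThreshold totalRead mostPopular t out) := by unfold Spec_recommendationWThreshold; infer_instance

-- ===== CLAIM (what is proved, stated in full; the proofs are below) =====
def Claim_equal_recommendationWThreshold : Prop := ∀ (totalRead : Int) (mostPopular : List (Int × String)) (t : Int), Dom_recommendationWThreshold totalRead mostPopular t → Spec_recommendationWThreshold totalRead mostPopular t (recommendationWThreshold totalRead mostPopular t)

-- ===== LEMMAS AND PROOFS =====

-- shifting the enumerate index of the search
theorem recWT_find_shift (th : Int) (l : List Int) (idx : Nat) :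
    recWT_find th idx l = (recWT_find th 0 l).map (fun n => n + idx) := by
  induction l generalizing idx with
  | nil => simp [recWT_find]
  | cons c rest ih =>
    by_cases h : c > th
    · simp [recWT_find, h]
      omega
    · simp only [recWT_find, if_neg h]
      rw [ih (idx + 1), ih 1, Option.map_map]
      congr 1
      funext n
      simp
      omega

-- loop invariant: A's break-loop from state (recSet, count) equals updating recSet with the
-- snds of the slice up to B's cutoff computed from the prefix sums started at count.
theorem recWT_main (totalRead t : Int) (l : List (Int × String)) :
    ∀ (recSet : PySem.Set String) (c : Int),
      recWT_goA totalRead t recSet c l =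
        PySem.Set.update recSet
          ((l.take ((recWT_find (pvFloatThresh totalRead t) 0 (recWT_prefix c l)).getD
              (recWT_prefix c l).length)).map Prod.snd) := by
  induction l with
  | nil => intro recSet c; simp [recWT_goA, recWT_prefix, recWT_find, PySem.Set.update_nil]
  | cons p rest ih =>
    intro recSet c
    obtain ⟨ic, i⟩ := p
    by_cases h : c + ic > pvFloatThresh totalRead t
    · simp [recWT_goA, recWT_prefix, recWT_find, h, PySem.Set.update_cons,
        PySem.Set.update_nil, List.take]
    · simp only [recWT_goA, recWT_prefix, if_neg h, recWT_find]
      rw [recWT_find_shift]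
      have hcut : ((recWT_find (pvFloatThresh totalRead t) 0 (recWT_prefix (c + ic) rest)).map
            (fun n => n + 1)).getD ((recWT_prefix (c + ic) rest).length + 1)
          = ((recWT_find (pvFloatThresh totalRead t) 0 (recWT_prefix (c + ic) rest)).getD
              (recWT_prefix (c + ic) rest).length) + 1 := by
        cases recWT_find (pvFloatThresh totalRead t) 0 (recWT_prefix (c + ic) rest) <;> simp
      simp only [List.length_cons, hcut, List.take_succ_cons, List.map_cons,
        PySem.Set.update_cons]
      exact ih (PySem.Set.add recSet i) (c + ic)

-- ===== VERDICT (by name: the statement is the Claim_ definition above) =====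
theorem recommendationWThreshold_spec : Claim_equal_recommendationWThreshold := by
  intro totalRead mostPopular t _
  unfold Spec_recommendationWThreshold recommendationWThreshold recommendationWThreshold_alt
  rw [recWT_main]
  exact PySem.Set.update_nil_left _
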